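-- pv_equiv track=rewrite | github.com/jongeunShin95/algorithm | programmers/옹알이(1).py | solution
-- ===== SOURCE A (Python) =====
-- def solution(babbling):
--     answer = 0
--     arr = ["aya", "ye", "woo", "ma"]
--
--     for x in babbling:
--         for y in arr:
--             x = x.replace(y, " ")
--
--         x = x.replace(" ", "")
--         if x == "": answer += 1
--     return answer
-- ===== SOURCE B (Python) =====
-- def solution(babbling):
--     def tiles(x):
--         if x == "":
--             return True
--         if x.startswith("aya"):
--             return tiles(x[3:])
--         if x.startswith("ye"):
--             return tiles(x[2:])
--         if x.startswith("woo"):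
--             return tiles(x[3:])
--         if x.startswith("ma"):
--             return tiles(x[2:])
--         return False
--     answer = 0
--     for x in babbling:
--         if tiles(x):
--             answer += 1
--     return answer
-- ===== Notes on version B (the rewrite author's own statement) =====
-- stated objective: alternative
-- what changed: B replaces A's chain of five global string replacements (pieces -> space sentinel, strip spaces, test empty) with a deterministic recursive-descent parser that checks each word tiles exactly into 'aya'/'ye'/'woo'/'ma' (the pieces start with distinct letters, so no backtracking is needed).
-- outside the precondition, e.g. on solution([' ']): A returns 1, B returns 0; on solution(['ma ma']): A returns 1, B returns 0; on solution(['ya ya']): A returns 0, B returns 0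
import Mathlib
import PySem

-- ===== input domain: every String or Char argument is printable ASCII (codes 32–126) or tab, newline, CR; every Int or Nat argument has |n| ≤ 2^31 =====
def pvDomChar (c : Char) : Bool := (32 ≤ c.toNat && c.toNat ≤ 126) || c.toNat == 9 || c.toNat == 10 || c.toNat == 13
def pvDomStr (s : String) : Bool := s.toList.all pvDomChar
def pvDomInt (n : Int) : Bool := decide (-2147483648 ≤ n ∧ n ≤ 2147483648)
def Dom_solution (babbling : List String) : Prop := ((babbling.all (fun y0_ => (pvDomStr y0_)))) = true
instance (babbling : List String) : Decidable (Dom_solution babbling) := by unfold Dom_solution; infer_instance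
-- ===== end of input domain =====

-- B replaces A's five global replace passes (space sentinel + strip) with a single deterministic
-- left-to-right parser into the four allowed pieces; Pre_ keeps to space-free words (the task's domain).


-- ===== PORT A =====
def solution (babbling : List String) : Int :=
  let arr := ["aya", "ye", "woo", "ma"]
  babbling.foldl (fun answer x0 =>
    let x := arr.foldl (fun x y => PySem.Str.replace x y " ") x0
    let x := PySem.Str.replace x " " ""
    if x == "" then answer + 1 else answer) 0

-- ===== PORT B =====
-- deterministic tiling check: each piece is identified by its first letter, so a single
-- left-to-right scan decides whether the word is a concatenation of allowed pieces
def tilesB (x : List Char) : Bool :=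
  match x with
  | [] => true
  | c :: t =>
    if List.isPrefixOf ['a','y','a'] (c :: t) then tilesB (t.drop 2)
    else if List.isPrefixOf ['y','e'] (c :: t) then tilesB (t.drop 1)
    else if List.isPrefixOf ['w','o','o'] (c :: t) then tilesB (t.drop 2)
    else if List.isPrefixOf ['m','a'] (c :: t) then tilesB (t.drop 1)
    else false
termination_by x.length
decreasing_by
  · simpa using Nat.lt_succ_of_le (Nat.le_trans (List.length_drop ▸ Nat.sub_le _ _) (Nat.le_refl _))
  · simpa using Nat.lt_succ_of_le (Nat.le_trans (List.length_drop ▸ Nat.sub_le _ _) (Nat.le_refl _))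
  · simpa using Nat.lt_succ_of_le (Nat.le_trans (List.length_drop ▸ Nat.sub_le _ _) (Nat.le_refl _))
  · simpa using Nat.lt_succ_of_le (Nat.le_trans (List.length_drop ▸ Nat.sub_le _ _) (Nat.le_refl _))

def solution_alt (babbling : List String) : Int :=
  babbling.foldl (fun answer x => if tilesB x.toList then answer + 1 else answer) 0

-- ===== PRECONDITION & SPEC =====
-- maximal space-separated chunks of a word (split at every ' ', empty chunks kept)
def chunksSp : List Char → List (List Char)
  | [] => [[]]
  | c :: t =>
    if c = ' ' then [] :: chunksSp t
    else
      match chunksSp t with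
      | [] => [[c]]
      | h :: r => (c :: h) :: r

-- shape every concatenation of the pieces aya/ye/woo/ma has: empty, or length ≥ 2,
-- starting with a piece's first letter and ending with a piece's last letter
def goodChunk (ch : List Char) : Bool :=
  ch.isEmpty || (decide (2 ≤ ch.length) &&
    decide (ch.head? ∈ [some 'a', some 'y', some 'w', some 'm']) &&
    decide (ch.getLast? ∈ [some 'a', some 'e', some 'o']))

-- Pre_ excludes inputs where some word contains a space, is built only from the piece letters
-- a,y,e,w,o,m and spaces, and every space-separated chunk has the shape of a piece concatenation
-- — outside the task's babbling-word domain — because A uses ' ' as its replacement sentinel and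
-- strips all spaces at the end, accidentally counting words like " " or "ma ma"; every other word
-- is kept (on space-free words the programs agree, and both reject the remaining spaced words).
def Pre_solution (babbling : List String) : Prop :=
  ∀ x ∈ babbling, ¬ (' ' ∈ x.toList ∧ (∀ c ∈ x.toList, c ∈ [' ','a','y','e','w','o','m']) ∧
    (∀ ch ∈ chunksSp x.toList, goodChunk ch = true))
instance (babbling : List String) : Decidable (Pre_solution babbling) := by unfold Pre_solution; infer_instance
def pvWitness_solution : List String := ["ayaye", "woomayemawoo", "yaya", ""]

def Spec_solution (babbling : List String) (out : Int) : Prop := out = solution_alt babbling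
instance (babbling : List String) (out : Int) : Decidable (Spec_solution babbling out) := by unfold Spec_solution; infer_instance

-- ===== CLAIM (what is proved, stated in full; the proofs are below) =====
def Claim_equal_solution : Prop := ∀ (babbling : List String), Dom_solution babbling → Pre_solution babbling → Spec_solution babbling (solution babbling)

-- ===== LEMMAS AND PROOFS =====

-- clean recursive characterisation of Python's str.replace (nonempty pattern o::os)
def repl (o : Char) (os new : List Char) : List Char → List Char
  | [] => []
  | c :: t =>
    if List.isPrefixOf (o :: os) (c :: t) then new ++ repl o os new (t.drop os.length)
    else c :: repl o os new t
termination_by l => l.length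
decreasing_by
  · simpa using Nat.lt_succ_of_le (Nat.le_trans (List.length_drop ▸ Nat.sub_le _ _) (Nat.le_refl _))
  · simp

lemma replace_go_eq (o : Char) (os new : List Char) :
    ∀ fuel l acc, l.length ≤ fuel →
      PySem.Chars.replace.go (o :: os) new fuel l acc = acc.reverse ++ repl o os new l := by
  intro fuel
  induction fuel with
  | zero =>
      intro l acc h
      have : l = [] := List.eq_nil_of_length_eq_zero (Nat.le_zero.mp h)
      subst this
      simp [PySem.Chars.replace.go, repl]
  | succ n ih =>
      intro l acc h
      cases l with
      | nil => simp [PySem.Chars.replace.go, repl]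
      | cons c t =>
        rw [PySem.Chars.replace.go]
        by_cases hp : List.isPrefixOf (o :: os) (c :: t)
        · rw [if_pos hp, repl, if_pos hp]
          have hd : List.drop (o :: os).length (c :: t) = t.drop os.length := by simp
          rw [hd, ih _ _ (by
            have := h; simp at this
            calc (t.drop os.length).length ≤ t.length := by simp
              _ ≤ n := this)]
          simp
        · rw [if_neg hp, repl, if_neg hp]
          rw [ih _ _ (by simpa using Nat.le_of_succ_le_succ h)]
          simp

lemma replace_eq (o : Char) (os new l : List Char) :
    PySem.Chars.replace l (o :: os) new = repl o os new l := by
  rw [PySem.Chars.replace]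
  simp only [List.isEmpty_cons, Bool.false_eq_true, if_false]
  exact replace_go_eq o os new l.length l [] (Nat.le_refl _)

lemma repl_cons_ne {o : Char} (os new : List Char) {c : Char} (t : List Char) (h : o ≠ c) :
    repl o os new (c :: t) = c :: repl o os new t := by
  rw [repl, if_neg]
  simp [List.isPrefixOf_cons₂, h]

lemma repl_cons_not {o : Char} {os : List Char} (new : List Char) {c : Char} {t : List Char}
    (h : ¬ List.isPrefixOf (o :: os) (c :: t)) :
    repl o os new (c :: t) = c :: repl o os new t := by
  rw [repl, if_neg h]

lemma isPrefixOf_append_self (l r : List Char) : List.isPrefixOf l (l ++ r) = true := by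
  induction l with
  | nil => simp [List.isPrefixOf]
  | cons c t ih => simp [List.isPrefixOf, ih]

lemma repl_pref (o : Char) (os new r : List Char) :
    repl o os new (o :: (os ++ r)) = new ++ repl o os new r := by
  rw [repl, if_pos]
  · rw [List.drop_left]
  · exact isPrefixOf_append_self (o :: os) r

lemma repl_head (o : Char) (os : List Char) (c : Char) (t : List Char) :
    ∃ d u, repl o os [' '] (c :: t) = d :: u ∧ (d = c ∨ d = ' ') := by
  rw [repl]
  by_cases hp : List.isPrefixOf (o :: os) (c :: t)
  · exact ⟨' ', _, by rw [if_pos hp]; rfl, Or.inr rfl⟩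
  · exact ⟨c, _, by rw [if_neg hp], Or.inl rfl⟩

-- the five stages and the full chain
def stAy (l : List Char) : List Char := repl 'a' ['y','a'] [' '] l
def stYe (l : List Char) : List Char := repl 'y' ['e'] [' '] l
def stWo (l : List Char) : List Char := repl 'w' ['o','o'] [' '] l
def stMa (l : List Char) : List Char := repl 'm' ['a'] [' '] l
def stSp (l : List Char) : List Char := repl ' ' [] [] l
def chainC (s : List Char) : List Char := stSp (stMa (stWo (stYe (stAy s))))

lemma stS_space (t : List Char) : stSp (' ' :: t) = stSp t := by
  have := repl_pref ' ' [] [] t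
  simpa [stSp] using this

lemma stS_ne {c : Char} (t : List Char) (h : c ≠ ' ') : stSp (c :: t) = c :: stSp t := by
  unfold stSp; exact repl_cons_ne [] [] t (fun he => h he.symm)

-- pass-through of a space through the middle stages
lemma mid_space (l : List Char) :
    stMa (stWo (stYe (' ' :: l))) = ' ' :: stMa (stWo (stYe l)) := by
  unfold stYe stWo stMa
  rw [repl_cons_ne ['e'] [' '] l (by decide),
      repl_cons_ne ['o','o'] [' '] _ (by decide),
      repl_cons_ne ['a'] [' '] _ (by decide)]

lemma chain_space (l : List Char) :
    stSp (stMa (stWo (stYe (' ' :: l)))) = stSp (stMa (stWo (stYe l))) := by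
  rw [mid_space, stS_space]

lemma cl_aya (r : List Char) : chainC ('a' :: 'y' :: 'a' :: r) = chainC r := by
  unfold chainC
  have h1 : stAy ('a' :: 'y' :: 'a' :: r) = ' ' :: stAy r := by
    have := repl_pref 'a' ['y','a'] [' '] r
    simpa [stAy] using this
  rw [h1, chain_space]

lemma cl_ye (r : List Char) : chainC ('y' :: 'e' :: r) = chainC r := by
  unfold chainC
  have h1 : stAy ('y' :: 'e' :: r) = 'y' :: 'e' :: stAy r := by
    unfold stAy
    rw [repl_cons_ne _ _ _ (by decide), repl_cons_ne _ _ _ (by decide)]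
  rw [h1]
  have h2 : stYe ('y' :: 'e' :: stAy r) = ' ' :: stYe (stAy r) := by
    have := repl_pref 'y' ['e'] [' '] (stAy r)
    simpa [stYe] using this
  rw [h2]
  unfold stWo stMa
  rw [repl_cons_ne ['o','o'] [' '] _ (by decide), repl_cons_ne ['a'] [' '] _ (by decide), stS_space]

lemma cl_woo (r : List Char) : chainC ('w' :: 'o' :: 'o' :: r) = chainC r := by
  unfold chainC
  have h1 : stAy ('w' :: 'o' :: 'o' :: r) = 'w' :: 'o' :: 'o' :: stAy r := by
    unfold stAy
    rw [repl_cons_ne _ _ _ (by decide), repl_cons_ne _ _ _ (by decide), repl_cons_ne _ _ _ (by decide)]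
  rw [h1]
  have h2 : stYe ('w' :: 'o' :: 'o' :: stAy r) = 'w' :: 'o' :: 'o' :: stYe (stAy r) := by
    unfold stYe
    rw [repl_cons_ne _ _ _ (by decide), repl_cons_ne _ _ _ (by decide), repl_cons_ne _ _ _ (by decide)]
  rw [h2]
  have h3 : stWo ('w' :: 'o' :: 'o' :: stYe (stAy r)) = ' ' :: stWo (stYe (stAy r)) := by
    have := repl_pref 'w' ['o','o'] [' '] (stYe (stAy r))
    simpa [stWo] using this
  rw [h3]
  unfold stMa
  rw [repl_cons_ne ['a'] [' '] _ (by decide), stS_space]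

lemma cl_ma (r : List Char) (h : ¬ List.isPrefixOf ['y','a'] r) :
    chainC ('m' :: 'a' :: r) = chainC r := by
  unfold chainC
  have h1 : stAy ('m' :: 'a' :: r) = 'm' :: 'a' :: stAy r := by
    unfold stAy
    rw [repl_cons_ne _ _ _ (by decide)]
    rw [repl_cons_not [' '] (by simpa [List.isPrefixOf_cons₂] using h)]
  rw [h1]
  have h2 : stYe ('m' :: 'a' :: stAy r) = 'm' :: 'a' :: stYe (stAy r) := by
    unfold stYe
    rw [repl_cons_ne _ _ _ (by decide), repl_cons_ne _ _ _ (by decide)]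
  rw [h2]
  have h3 : stWo ('m' :: 'a' :: stYe (stAy r)) = 'm' :: 'a' :: stWo (stYe (stAy r)) := by
    unfold stWo
    rw [repl_cons_ne _ _ _ (by decide), repl_cons_ne _ _ _ (by decide)]
  rw [h3]
  have h4 : stMa ('m' :: 'a' :: stWo (stYe (stAy r))) = ' ' :: stMa (stWo (stYe (stAy r))) := by
    have := repl_pref 'm' ['a'] [' '] (stWo (stYe (stAy r)))
    simpa [stMa] using this
  rw [h4, stS_space]

lemma cl_maya (v : List Char) : chainC ('m' :: 'a' :: 'y' :: 'a' :: v) ≠ [] := by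
  unfold chainC
  have h1 : stAy ('m' :: 'a' :: 'y' :: 'a' :: v) = 'm' :: ' ' :: stAy v := by
    unfold stAy
    rw [repl_cons_ne _ _ _ (by decide)]
    have := repl_pref 'a' ['y','a'] [' '] v
    simpa using this
  rw [h1]
  have h2 : stYe ('m' :: ' ' :: stAy v) = 'm' :: ' ' :: stYe (stAy v) := by
    unfold stYe
    rw [repl_cons_ne _ _ _ (by decide), repl_cons_ne _ _ _ (by decide)]
  rw [h2]
  have h3 : stWo ('m' :: ' ' :: stYe (stAy v)) = 'm' :: ' ' :: stWo (stYe (stAy v)) := by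
    unfold stWo
    rw [repl_cons_ne _ _ _ (by decide), repl_cons_ne _ _ _ (by decide)]
  rw [h3]
  have h4 : stMa ('m' :: ' ' :: stWo (stYe (stAy v))) = 'm' :: ' ' :: stMa (stWo (stYe (stAy v))) := by
    unfold stMa
    rw [repl_cons_not [' '] (by simp [List.isPrefixOf])]
    rw [repl_cons_ne _ _ _ (by decide)]
  rw [h4, stS_ne _ (by decide)]
  simp

lemma cl_a_fail (t : List Char) (h : ¬ List.isPrefixOf ['y','a'] t) : chainC ('a' :: t) ≠ [] := by
  unfold chainC
  have h1 : stAy ('a' :: t) = 'a' :: stAy t := by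
    unfold stAy
    exact repl_cons_not [' '] (by simpa [List.isPrefixOf_cons₂] using h)
  rw [h1]
  unfold stYe stWo stMa
  rw [repl_cons_ne _ _ _ (by decide), repl_cons_ne _ _ _ (by decide), repl_cons_ne _ _ _ (by decide),
      stS_ne _ (by decide)]
  simp

lemma cl_y_fail (t : List Char) (h : ∀ u, t ≠ 'e' :: u) : chainC ('y' :: t) ≠ [] := by
  unfold chainC
  have h1 : stAy ('y' :: t) = 'y' :: stAy t := repl_cons_ne _ _ _ (by decide)
  rw [h1]
  have h2 : stYe ('y' :: stAy t) = 'y' :: stYe (stAy t) := by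
    unfold stYe
    apply repl_cons_not
    cases t with
    | nil => simp [stAy, repl, List.isPrefixOf]
    | cons c u =>
      obtain ⟨d, w, hrw, hd⟩ := repl_head 'a' ['y','a'] c u
      have hde : d ≠ 'e' := by
        rcases hd with h' | h'
        · subst h'; intro he; exact h u (by rw [he])
        · subst h'; decide
      simp [stAy, hrw, List.isPrefixOf_cons₂]
      intro he; exact absurd he.symm hde
  rw [h2]
  unfold stWo stMa
  rw [repl_cons_ne _ _ _ (by decide), repl_cons_ne _ _ _ (by decide), stS_ne _ (by decide)]
  simp

lemma cl_w_fail (t : List Char) (h : ¬ List.isPrefixOf ['o','o'] t) : chainC ('w' :: t) ≠ [] := by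
  unfold chainC
  have h1 : stAy ('w' :: t) = 'w' :: stAy t := repl_cons_ne _ _ _ (by decide)
  rw [h1]
  have h2 : stYe ('w' :: stAy t) = 'w' :: stYe (stAy t) := repl_cons_ne _ _ _ (by decide)
  rw [h2]
  have h3 : stWo ('w' :: stYe (stAy t)) = 'w' :: stWo (stYe (stAy t)) := by
    unfold stWo
    apply repl_cons_not
    -- show "oo" is not a prefix of stYe (stAy t)
    cases t with
    | nil => simp [stAy, stYe, repl, List.isPrefixOf]
    | cons c u =>
      by_cases hc : c = 'o'
      · subst hc
        have hA : stAy ('o' :: u) = 'o' :: stAy u := repl_cons_ne _ _ _ (by decide)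
        have hY : stYe ('o' :: stAy u) = 'o' :: stYe (stAy u) := repl_cons_ne _ _ _ (by decide)
        rw [hA, hY]
        have hu : ∀ w, u ≠ 'o' :: w := by
          intro w hw; exact h (by rw [hw]; simp [List.isPrefixOf])
        cases u with
        | nil => simp [stAy, stYe, repl, List.isPrefixOf]
        | cons d v =>
          obtain ⟨e, w1, hrw1, he1⟩ := repl_head 'a' ['y','a'] d v
          have : ∃ f w2, stYe (stAy (d :: v)) = f :: w2 ∧ (f = d ∨ f = ' ') := by
            rw [show stAy (d :: v) = e :: w1 from hrw1]
            obtain ⟨f, w2, hrw2, hf2⟩ := repl_head 'y' ['e'] e w1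
            refine ⟨f, w2, hrw2, ?_⟩
            rcases hf2 with h' | h'
            · rcases he1 with h'' | h''
              · exact Or.inl (h' ▸ h'')
              · exact Or.inr (h' ▸ h'')
            · exact Or.inr h'
          obtain ⟨f, w2, hrw2, hf⟩ := this
          rw [hrw2]
          have hfo : f ≠ 'o' := by
            rcases hf with h' | h'
            · subst h'; intro hd; exact hu v (by rw [hd])
            · subst h'; decide
          simp [List.isPrefixOf_cons₂]
          intro he; exact absurd he.symm hfo
      · obtain ⟨e, w1, hrw1, he1⟩ := repl_head 'a' ['y','a'] c u
        rw [show stAy (c :: u) = e :: w1 from hrw1]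
        obtain ⟨f, w2, hrw2, hf2⟩ := repl_head 'y' ['e'] e w1
        rw [show stYe (e :: w1) = f :: w2 from hrw2]
        have hfo : f ≠ 'o' := by
          rcases hf2 with h' | h'
          · subst h'
            rcases he1 with h'' | h''
            · subst h''; exact hc
            · subst h''; decide
          · subst h'; decide
        simp [List.isPrefixOf_cons₂]
        intro he; exact absurd he.symm hfo
  rw [h3]
  unfold stMa
  rw [repl_cons_ne _ _ _ (by decide), stS_ne _ (by decide)]
  simp

lemma cl_m_fail (t : List Char) (h : ∀ u, t ≠ 'a' :: u) : chainC ('m' :: t) ≠ [] := by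
  unfold chainC
  have h1 : stAy ('m' :: t) = 'm' :: stAy t := repl_cons_ne _ _ _ (by decide)
  have h2 : stYe ('m' :: stAy t) = 'm' :: stYe (stAy t) := repl_cons_ne _ _ _ (by decide)
  have h3 : stWo ('m' :: stYe (stAy t)) = 'm' :: stWo (stYe (stAy t)) := repl_cons_ne _ _ _ (by decide)
  rw [h1, h2, h3]
  have h4 : stMa ('m' :: stWo (stYe (stAy t))) = 'm' :: stMa (stWo (stYe (stAy t))) := by
    unfold stMa
    apply repl_cons_not
    cases t with
    | nil => simp [stAy, stYe, stWo, repl, List.isPrefixOf]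
    | cons c u =>
      obtain ⟨e, w1, hrw1, he1⟩ := repl_head 'a' ['y','a'] c u
      rw [show stAy (c :: u) = e :: w1 from hrw1]
      obtain ⟨f, w2, hrw2, hf2⟩ := repl_head 'y' ['e'] e w1
      rw [show stYe (e :: w1) = f :: w2 from hrw2]
      obtain ⟨g, w3, hrw3, hg3⟩ := repl_head 'w' ['o','o'] f w2
      rw [show stWo (f :: w2) = g :: w3 from hrw3]
      have hga : g ≠ 'a' := by
        have hc : c ≠ 'a' := fun hc => h u (by rw [hc])
        rcases hg3 with h' | h'
        · subst h'
          rcases hf2 with h'' | h''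
          · subst h''
            rcases he1 with h3' | h3'
            · subst h3'; exact hc
            · subst h3'; decide
          · subst h''; decide
        · subst h'; decide
      simp [List.isPrefixOf_cons₂]
      intro he; exact absurd he.symm hga
  rw [h4, stS_ne _ (by decide)]
  simp

lemma cl_other (c : Char) (t : List Char)
    (ha : c ≠ 'a') (hy : c ≠ 'y') (hw : c ≠ 'w') (hm : c ≠ 'm') (hs : c ≠ ' ') :
    chainC (c :: t) ≠ [] := by
  unfold chainC
  rw [show stAy (c :: t) = c :: stAy t from repl_cons_ne _ _ _ (fun he => ha he.symm),
      show stYe (c :: stAy t) = c :: stYe (stAy t) from repl_cons_ne _ _ _ (fun he => hy he.symm),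
      show stWo (c :: stYe (stAy t)) = c :: stWo (stYe (stAy t)) from repl_cons_ne _ _ _ (fun he => hw he.symm),
      show stMa (c :: stWo (stYe (stAy t))) = c :: stMa (stWo (stYe (stAy t))) from repl_cons_ne _ _ _ (fun he => hm he.symm),
      stS_ne _ hs]
  simp

-- the central characterisation: A's replace chain empties exactly when the word tiles
lemma shape2 (a b c : Char) (t : List Char) (h : List.isPrefixOf [a, b] (c :: t) = true) :
    c = a ∧ ∃ r, t = b :: r := by
  cases t with
  | nil => simp [List.isPrefixOf] at h
  | cons d u =>
    simp [List.isPrefixOf] at h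
    exact ⟨h.1.symm, u, by rw [h.2]⟩

lemma shape3 (a b e c : Char) (t : List Char) (h : List.isPrefixOf [a, b, e] (c :: t) = true) :
    c = a ∧ ∃ r, t = b :: e :: r := by
  cases t with
  | nil => simp [List.isPrefixOf] at h
  | cons d u =>
    cases u with
    | nil => simp [List.isPrefixOf] at h
    | cons d2 v =>
      simp [List.isPrefixOf] at h
      exact ⟨h.1.symm, v, by rw [h.2.1, h.2.2]⟩

lemma chain_tiles : ∀ s : List Char, ' ' ∉ s → (chainC s = [] ↔ tilesB s = true) := by
  intro s
  induction s using tilesB.induct with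
  | case1 =>
      intro _
      simp [chainC, stAy, stYe, stWo, stMa, stSp, repl, tilesB]
  | case2 c t hp ih =>
      intro hsp
      obtain ⟨hc, r, ht⟩ := shape3 'a' 'y' 'a' c t hp
      subst hc; subst ht
      simp only [List.drop_succ_cons, List.drop_zero] at ih
      rw [cl_aya, tilesB]
      simp only [if_pos hp, List.drop_succ_cons, List.drop_zero]
      exact ih (fun hm => hsp (by simp [hm]))
  | case3 c t hp1 hp ih =>
      intro hsp
      obtain ⟨hc, r, ht⟩ := shape2 'y' 'e' c t hp
      subst hc; subst ht
      simp only [List.drop_succ_cons, List.drop_zero] at ih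
      rw [cl_ye, tilesB]
      simp only [if_neg hp1, if_pos hp, List.drop_succ_cons, List.drop_zero]
      exact ih (fun hm => hsp (by simp [hm]))
  | case4 c t hp1 hp2 hp ih =>
      intro hsp
      obtain ⟨hc, r, ht⟩ := shape3 'w' 'o' 'o' c t hp
      subst hc; subst ht
      simp only [List.drop_succ_cons, List.drop_zero] at ih
      rw [cl_woo, tilesB]
      simp only [if_neg hp1, if_neg hp2, if_pos hp, List.drop_succ_cons, List.drop_zero]
      exact ih (fun hm => hsp (by simp [hm]))
  | case5 c t hp1 hp2 hp3 hp ih =>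
      intro hsp
      obtain ⟨hc, r, ht⟩ := shape2 'm' 'a' c t hp
      subst hc; subst ht
      simp only [List.drop_succ_cons, List.drop_zero] at ih
      by_cases hya : List.isPrefixOf ['y', 'a'] r
      · -- the "maya" overlap: both sides are false
        obtain ⟨v, hv⟩ : ∃ v, r = 'y' :: 'a' :: v := by
          cases r with
          | nil => simp [List.isPrefixOf] at hya
          | cons d u =>
            obtain ⟨hd, w, hw⟩ := shape2 'y' 'a' d u hya
            exact ⟨w, by rw [hd, hw]⟩
        subst hv
        constructor
        · intro hch; exact absurd hch (cl_maya v)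
        · intro ht
          rw [tilesB] at ht
          simp only [if_neg hp1, if_neg hp2, if_neg hp3, if_pos hp, List.drop_succ_cons,
            List.drop_zero] at ht
          rw [tilesB] at ht
          simp [List.isPrefixOf] at ht
      · rw [cl_ma r hya, tilesB]
        simp only [if_neg hp1, if_neg hp2, if_neg hp3, if_pos hp, List.drop_succ_cons,
          List.drop_zero]
        exact ih (fun hm => hsp (by simp [hm]))
  | case6 c t hp1 hp2 hp3 hp4 =>
      intro hsp
      have hsc : c ≠ ' ' := fun hc => hsp (by simp [hc])
      have hne : chainC (c :: t) ≠ [] := by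
        by_cases ha : c = 'a'
        · subst ha
          apply cl_a_fail
          intro hpre
          exact hp1 (by simpa [List.isPrefixOf] using hpre)
        · by_cases hy : c = 'y'
          · subst hy
            apply cl_y_fail
            intro u hu
            exact hp2 (by rw [hu]; simp [List.isPrefixOf])
          · by_cases hw : c = 'w'
            · subst hw
              apply cl_w_fail
              intro hpre
              exact hp3 (by simpa [List.isPrefixOf] using hpre)
            · by_cases hm : c = 'm'
              · subst hm
                apply cl_m_fail
                intro u hu
                exact hp4 (by rw [hu]; simp [List.isPrefixOf])
              · exact cl_other c t ha hy hw hm hsc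
      constructor
      · intro hch; exact absurd hch hne
      · intro ht
        rw [tilesB] at ht
        simp only [if_neg hp1, if_neg hp2, if_neg hp3, if_neg hp4] at ht
        exact absurd ht (by simp)

-- a word containing a character other than the piece letters (and not a space) is rejected by both
lemma mem_repl (o : Char) (os new : List Char) (c : Char) :
    ∀ l : List Char, c ∈ l → c ∉ (o :: os) → c ∉ new → c ∈ repl o os new l := by
  intro l
  induction l using repl.induct o os with
  | case1 => intro h; simp at h
  | case2 c' t hp ih =>
      intro hm hno hnew
      obtain ⟨u, hu⟩ := List.isPrefixOf_iff_prefix.mp hp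
      have ht : t = os ++ u := by
        have h2 := hu
        simp only [List.cons_append, List.cons.injEq] at h2
        exact h2.2.symm
      have hdrop : t.drop os.length = u := by rw [ht, List.drop_left]
      rw [repl, if_pos hp, hdrop]
      have hcu : c ∈ u := by
        have h3 : c ∈ (o :: os) ++ u := by
          have h4 : (o :: os) ++ u = c' :: t := hu
          rw [h4]; exact hm
        rcases List.mem_append.mp h3 with h' | h'
        · exact absurd h' hno
        · exact h'
      have h5 := ih (hdrop ▸ hcu) hno hnew
      rw [hdrop] at h5
      exact List.mem_append.mpr (Or.inr h5)
  | case3 c' t hp ih =>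
      intro hm hno hnew
      rw [repl, if_neg hp]
      rcases List.mem_cons.mp hm with h' | h'
      · exact h' ▸ List.mem_cons_self
      · exact List.mem_cons_of_mem _ (ih h' hno hnew)

lemma chain_foreign (s : List Char) (c : Char) (hm : c ∈ s)
    (hc : c ∉ [' ','a','y','e','w','o','m']) : chainC s ≠ [] := by
  simp only [List.mem_cons, not_or] at hc
  obtain ⟨hs, ha, hy, he, hw, ho, hmm, -⟩ := hc
  have h1 : c ∈ stAy s := mem_repl _ _ _ c s hm (by simp [ha, hy]) (by simp [hs])
  have h2 : c ∈ stYe (stAy s) := mem_repl _ _ _ c _ h1 (by simp [hy, he]) (by simp [hs])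
  have h3 : c ∈ stWo (stYe (stAy s)) := mem_repl _ _ _ c _ h2 (by simp [hw, ho]) (by simp [hs])
  have h4 : c ∈ stMa (stWo (stYe (stAy s))) := mem_repl _ _ _ c _ h3 (by simp [hmm, ha]) (by simp [hs])
  have h5 : c ∈ chainC s := mem_repl _ _ _ c _ h4 (by simp [hs]) (by simp)
  exact List.ne_nil_of_mem h5

lemma tiles_foreign (c : Char) (hc : c ∉ ['a','y','e','w','o','m']) :
    ∀ s : List Char, c ∈ s → tilesB s = false := by
  simp only [List.mem_cons, not_or] at hc
  obtain ⟨ha, hy, he, hw, ho, hmm, -⟩ := hc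
  intro s
  induction s using tilesB.induct with
  | case1 => intro h; simp at h
  | case2 c' t hp ih =>
      intro hm
      obtain ⟨hc', r, ht⟩ := shape3 'a' 'y' 'a' c' t hp
      subst hc'; subst ht
      simp only [List.drop_succ_cons, List.drop_zero] at ih
      rw [tilesB]
      simp only [if_pos hp, List.drop_succ_cons, List.drop_zero]
      apply ih
      simp only [List.mem_cons] at hm
      rcases hm with h' | h' | h' | h' <;> first
        | exact absurd h' (by simp [ha, hy])
        | exact h'
  | case3 c' t hp1 hp ih =>
      intro hm
      obtain ⟨hc', r, ht⟩ := shape2 'y' 'e' c' t hp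
      subst hc'; subst ht
      simp only [List.drop_succ_cons, List.drop_zero] at ih
      rw [tilesB]
      simp only [if_neg hp1, if_pos hp, List.drop_succ_cons, List.drop_zero]
      apply ih
      simp only [List.mem_cons] at hm
      rcases hm with h' | h' | h' <;> first
        | exact absurd h' (by simp [hy, he])
        | exact h'
  | case4 c' t hp1 hp2 hp ih =>
      intro hm
      obtain ⟨hc', r, ht⟩ := shape3 'w' 'o' 'o' c' t hp
      subst hc'; subst ht
      simp only [List.drop_succ_cons, List.drop_zero] at ih
      rw [tilesB]
      simp only [if_neg hp1, if_neg hp2, if_pos hp, List.drop_succ_cons, List.drop_zero]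
      apply ih
      simp only [List.mem_cons] at hm
      rcases hm with h' | h' | h' | h' <;> first
        | exact absurd h' (by simp [hw, ho])
        | exact h'
  | case5 c' t hp1 hp2 hp3 hp ih =>
      intro hm
      obtain ⟨hc', r, ht⟩ := shape2 'm' 'a' c' t hp
      subst hc'; subst ht
      simp only [List.drop_succ_cons, List.drop_zero] at ih
      rw [tilesB]
      simp only [if_neg hp1, if_neg hp2, if_neg hp3, if_pos hp, List.drop_succ_cons,
        List.drop_zero]
      apply ih
      simp only [List.mem_cons] at hm
      rcases hm with h' | h' | h' <;> first
        | exact absurd h' (by simp [hmm, ha])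
        | exact h'
  | case6 c' t hp1 hp2 hp3 hp4 =>
      intro _
      rw [tilesB]
      simp only [if_neg hp1, if_neg hp2, if_neg hp3, if_neg hp4]

-- a word containing a space is never a piece concatenation
lemma tiles_space (s : List Char) (h : ' ' ∈ s) : tilesB s = false :=
  tiles_foreign ' ' (by decide) s h

lemma repl_cons (o : Char) (os new : List Char) (c : Char) (t : List Char) :
    repl o os new (c :: t) =
      if List.isPrefixOf (o :: os) (c :: t) then new ++ repl o os new (t.drop os.length)
      else c :: repl o os new t := by
  rw [repl]

-- a pattern without spaces cannot reach past a space
lemma prefix_through_space (p : List Char) (hp : ' ' ∉ p) :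
    ∀ x y : List Char, List.isPrefixOf p (x ++ ' ' :: y) = List.isPrefixOf p x := by
  induction p with
  | nil => intro x y; simp [List.isPrefixOf]
  | cons a p' ih =>
      intro x y
      have ha : a ≠ ' ' := fun h => hp (h ▸ List.mem_cons_self)
      have hp' : ' ' ∉ p' := fun h => hp (List.mem_cons_of_mem _ h)
      cases x with
      | nil => simp [List.isPrefixOf, ha]
      | cons c x' => simp [List.isPrefixOf, ih hp' x' y]

-- each replacement stage distributes over a space (its pattern has none)
lemma repl_append_space (o : Char) (os : List Char) (ho : ' ' ∉ (o :: os)) :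
    ∀ (n : Nat) (x y : List Char), x.length ≤ n →
      repl o os [' '] (x ++ ' ' :: y) = repl o os [' '] x ++ ' ' :: repl o os [' '] y := by
  have hosp : o ≠ ' ' := fun h' => ho (by rw [h']; exact List.mem_cons_self)
  intro n
  induction n with
  | zero =>
      intro x y h
      have hx : x = [] := List.eq_nil_of_length_eq_zero (Nat.le_zero.mp h)
      subst hx
      rw [List.nil_append, repl_cons_ne os [' '] y hosp]
      simp [repl]
  | succ n ih =>
      intro x y h
      cases x with
      | nil =>
          rw [List.nil_append, repl_cons_ne os [' '] y hosp]
          simp [repl]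
      | cons c x' =>
          have hcond : List.isPrefixOf (o :: os) (c :: x' ++ ' ' :: y)
              = List.isPrefixOf (o :: os) (c :: x') := prefix_through_space (o :: os) ho (c :: x') y
          rw [show (c :: x' ++ ' ' :: y) = c :: (x' ++ ' ' :: y) from rfl,
              repl_cons o os [' '] c (x' ++ ' ' :: y), repl_cons o os [' '] c x',
              show (c :: (x' ++ ' ' :: y)) = c :: x' ++ ' ' :: y from rfl, hcond]
          by_cases hpf : List.isPrefixOf (o :: os) (c :: x')
          · have hlen : os.length ≤ x'.length := by
              have := (List.isPrefixOf_iff_prefix.mp hpf).length_le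
              simpa using this
            rw [if_pos hpf, if_pos hpf, List.drop_append_of_le_length hlen,
                ih (x'.drop os.length) y
                  (Nat.le_trans (List.length_drop ▸ Nat.sub_le _ _) (Nat.le_of_succ_le_succ h))]
            simp
          · rw [if_neg hpf, if_neg hpf, ih x' y (Nat.le_of_succ_le_succ h)]
            rfl

lemma stSp_append (x y : List Char) : stSp (x ++ ' ' :: y) = stSp x ++ stSp y := by
  induction x with
  | nil => rw [List.nil_append, stS_space]; simp [stSp, repl]
  | cons c x' ih =>
      by_cases hc : c = ' '
      · subst hc
        rw [show (' ' :: x') ++ ' ' :: y = ' ' :: (x' ++ ' ' :: y) from rfl,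
            stS_space, stS_space, ih]
      · rw [show (c :: x') ++ ' ' :: y = c :: (x' ++ ' ' :: y) from rfl,
            stS_ne _ hc, stS_ne _ hc, ih]
        rfl

lemma chain_append_space (x y : List Char) :
    chainC (x ++ ' ' :: y) = chainC x ++ chainC y := by
  unfold chainC stAy stYe stWo stMa
  rw [repl_append_space 'a' ['y','a'] (by decide) x.length x y (Nat.le_refl _),
      repl_append_space 'y' ['e'] (by decide) _ _ _ (Nat.le_refl _),
      repl_append_space 'w' ['o','o'] (by decide) _ _ _ (Nat.le_refl _),
      repl_append_space 'm' ['a'] (by decide) _ _ _ (Nat.le_refl _)]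
  exact stSp_append _ _

lemma chunksSp_ne_nil : ∀ s : List Char, chunksSp s ≠ [] := by
  intro s
  cases s with
  | nil => simp [chunksSp]
  | cons c t =>
      rw [chunksSp]
      by_cases hc : c = ' '
      · simp [hc]
      · simp only [if_neg hc]
        cases chunksSp t <;> simp

lemma chunksSp_no_space : ∀ (s : List Char), ∀ ch ∈ chunksSp s, ' ' ∉ ch := by
  intro s
  induction s with
  | nil => intro ch h; simp [chunksSp] at h; simp [h]
  | cons c t ih =>
      intro ch h
      rw [chunksSp] at h
      by_cases hc : c = ' '
      · rw [if_pos hc] at h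
        rcases List.mem_cons.mp h with h' | h'
        · simp [h']
        · exact ih ch h'
      · rw [if_neg hc] at h
        cases heq : chunksSp t with
        | nil => exact absurd heq (chunksSp_ne_nil t)
        | cons hd r =>
            rw [heq] at h
            rcases List.mem_cons.mp h with h' | h'
            · subst h'
              intro hm
              rcases List.mem_cons.mp hm with h'' | h''
              · exact hc h''.symm
              · exact ih hd (heq ▸ List.mem_cons_self) h''
            · exact ih ch (heq ▸ List.mem_cons_of_mem _ h')

lemma chunksSp_of_no_space : ∀ s : List Char, ' ' ∉ s → chunksSp s = [s] := by
  intro s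
  induction s with
  | nil => intro _; rfl
  | cons c t ih =>
      intro h
      have hc : c ≠ ' ' := fun h' => h (h' ▸ List.mem_cons_self)
      rw [chunksSp, if_neg hc, ih (fun h' => h (List.mem_cons_of_mem _ h'))]

lemma first_space_decomp : ∀ s : List Char, ' ' ∈ s → ∃ u v, s = u ++ ' ' :: v ∧ ' ' ∉ u := by
  intro s
  induction s with
  | nil => intro h; simp at h
  | cons c t ih =>
      intro h
      by_cases hc : c = ' '
      · exact ⟨[], t, by rw [hc]; rfl, by simp⟩
      · have ht : ' ' ∈ t := by
          rcases List.mem_cons.mp h with h' | h'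
          · exact absurd h'.symm hc
          · exact h'
        obtain ⟨u, v, hs, hu⟩ := ih ht
        exact ⟨c :: u, v, by rw [hs]; rfl, by
          intro hm
          rcases List.mem_cons.mp hm with h' | h'
          · exact hc h'.symm
          · exact hu h'⟩

lemma chunksSp_append_space : ∀ (u v : List Char), ' ' ∉ u →
    chunksSp (u ++ ' ' :: v) = u :: chunksSp v := by
  intro u
  induction u with
  | nil => intro v _; rw [List.nil_append, chunksSp, if_pos rfl]
  | cons c u' ih =>
      intro v h
      have hc : c ≠ ' ' := fun h' => h (h' ▸ List.mem_cons_self)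
      rw [show (c :: u') ++ ' ' :: v = c :: (u' ++ ' ' :: v) from rfl, chunksSp, if_neg hc,
          ih v (fun h' => h (List.mem_cons_of_mem _ h'))]

lemma chain_chunks : ∀ (n : Nat) (s : List Char), s.length ≤ n →
    (chainC s = [] ↔ ∀ ch ∈ chunksSp s, chainC ch = []) := by
  intro n
  induction n with
  | zero =>
      intro s h
      have : s = [] := List.eq_nil_of_length_eq_zero (Nat.le_zero.mp h)
      subst this
      simp [chunksSp, chainC, stAy, stYe, stWo, stMa, stSp, repl]
  | succ n ih =>
      intro s h
      by_cases hs : ' ' ∈ s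
      · obtain ⟨u, v, hdec, hu⟩ := first_space_decomp s hs
        subst hdec
        rw [chain_append_space, chunksSp_append_space u v hu]
        have hlen : v.length ≤ n := by
          have := h
          simp only [List.length_append, List.length_cons] at this
          omega
        constructor
        · intro hnil ch hch
          have hsplit := List.append_eq_nil_iff.mp hnil
          rcases List.mem_cons.mp hch with h' | h'
          · rw [h']; exact hsplit.1
          · exact ((ih v hlen).mp hsplit.2) ch h'
        · intro hall
          rw [hall u List.mem_cons_self, List.nil_append]
          exact (ih v hlen).mpr (fun ch hch => hall ch (List.mem_cons_of_mem _ hch))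
      · rw [chunksSp_of_no_space s hs]
        simp

-- shape facts about piece concatenations
lemma tilesB_single (c : Char) : tilesB [c] = false := by
  rw [tilesB]
  simp [List.isPrefixOf]

lemma tilesB_head (c : Char) (t : List Char) (h : tilesB (c :: t) = true) :
    c = 'a' ∨ c = 'y' ∨ c = 'w' ∨ c = 'm' := by
  rw [tilesB] at h
  split_ifs at h with h1 h2 h3 h4
  · exact Or.inl (shape3 'a' 'y' 'a' c t h1).1
  · exact Or.inr (Or.inl (shape2 'y' 'e' c t h2).1)
  · exact Or.inr (Or.inr (Or.inl (shape3 'w' 'o' 'o' c t h3).1))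
  · exact Or.inr (Or.inr (Or.inr (shape2 'm' 'a' c t h4).1))

lemma getLast?_cons_ne_nil (a : Char) {l : List Char} (h : l ≠ []) :
    (a :: l).getLast? = l.getLast? := by
  cases l with
  | nil => exact absurd rfl h
  | cons b l' => simp [List.getLast?_cons_cons]

lemma tilesB_last : ∀ s : List Char, tilesB s = true → ∀ c, s.getLast? = some c →
    c = 'a' ∨ c = 'e' ∨ c = 'o' := by
  intro s
  induction s using tilesB.induct with
  | case1 => intro _ c hc; simp at hc
  | case2 c' t hp ih =>
      intro h c hc
      obtain ⟨hc', r, ht⟩ := shape3 'a' 'y' 'a' c' t hp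
      subst hc'; subst ht
      simp only [List.drop_succ_cons, List.drop_zero] at ih
      rw [tilesB] at h
      simp only [if_pos hp, List.drop_succ_cons, List.drop_zero] at h
      cases hr : r with
      | nil => subst hr; simp at hc; exact Or.inl hc.symm
      | cons d r' =>
          subst hr
          rw [getLast?_cons_ne_nil _ (by simp), getLast?_cons_ne_nil _ (by simp),
              getLast?_cons_ne_nil _ (by simp)] at hc
          exact ih h c hc
  | case3 c' t hp1 hp ih =>
      intro h c hc
      obtain ⟨hc', r, ht⟩ := shape2 'y' 'e' c' t hp
      subst hc'; subst ht
      simp only [List.drop_succ_cons, List.drop_zero] at ih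
      rw [tilesB] at h
      simp only [if_neg hp1, if_pos hp, List.drop_succ_cons, List.drop_zero] at h
      cases hr : r with
      | nil => subst hr; simp at hc; exact Or.inr (Or.inl hc.symm)
      | cons d r' =>
          subst hr
          rw [getLast?_cons_ne_nil _ (by simp), getLast?_cons_ne_nil _ (by simp)] at hc
          exact ih h c hc
  | case4 c' t hp1 hp2 hp ih =>
      intro h c hc
      obtain ⟨hc', r, ht⟩ := shape3 'w' 'o' 'o' c' t hp
      subst hc'; subst ht
      simp only [List.drop_succ_cons, List.drop_zero] at ih
      rw [tilesB] at h
      simp only [if_neg hp1, if_neg hp2, if_pos hp, List.drop_succ_cons, List.drop_zero] at h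
      cases hr : r with
      | nil => subst hr; simp at hc; exact Or.inr (Or.inr hc.symm)
      | cons d r' =>
          subst hr
          rw [getLast?_cons_ne_nil _ (by simp), getLast?_cons_ne_nil _ (by simp),
              getLast?_cons_ne_nil _ (by simp)] at hc
          exact ih h c hc
  | case5 c' t hp1 hp2 hp3 hp ih =>
      intro h c hc
      obtain ⟨hc', r, ht⟩ := shape2 'm' 'a' c' t hp
      subst hc'; subst ht
      simp only [List.drop_succ_cons, List.drop_zero] at ih
      rw [tilesB] at h
      simp only [if_neg hp1, if_neg hp2, if_neg hp3, if_pos hp, List.drop_succ_cons,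
        List.drop_zero] at h
      cases hr : r with
      | nil => subst hr; simp at hc; exact Or.inl hc.symm
      | cons d r' =>
          subst hr
          rw [getLast?_cons_ne_nil _ (by simp), getLast?_cons_ne_nil _ (by simp)] at hc
          exact ih h c hc
  | case6 c' t hp1 hp2 hp3 hp4 =>
      intro h
      rw [tilesB] at h
      simp only [if_neg hp1, if_neg hp2, if_neg hp3, if_neg hp4] at h
      exact absurd h (by simp)

-- a chunk that tiles has the good shape
lemma tiles_good (ch : List Char) (h : tilesB ch = true) : goodChunk ch = true := by
  cases ch with
  | nil => rfl
  | cons c t =>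
      simp only [goodChunk, List.isEmpty_cons, Bool.false_or, Bool.and_eq_true,
        decide_eq_true_eq]
      refine ⟨⟨?_, ?_⟩, ?_⟩
      · cases t with
        | nil => exact absurd h (by rw [tilesB_single]; simp)
        | cons d t' => simp
      · rcases tilesB_head c t h with h' | h' | h' | h' <;> subst h' <;> simp
      · cases hlast : (c :: t).getLast? with
        | none => exact absurd (List.getLast?_eq_none_iff.mp hlast) (by simp)
        | some d =>
            rcases tilesB_last (c :: t) h d hlast with h' | h' | h' <;> subst h' <;> simp

-- per-word bridge: A's emptiness test equals B's tiler
lemma beq_empty_eq (s : String) : (s == "") = (s.toList == []) := by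
  by_cases h : s = ""
  · subst h; rfl
  · rw [beq_eq_false_iff_ne.mpr h, beq_eq_false_iff_ne.mpr
      (fun hl => h (String.toList_inj.mp (by simpa using hl)))]

lemma word_eq (x : String)
    (h : ¬ (' ' ∈ x.toList ∧ (∀ c ∈ x.toList, c ∈ [' ','a','y','e','w','o','m']) ∧
      (∀ ch ∈ chunksSp x.toList, goodChunk ch = true))) :
    ((PySem.Str.replace (["aya", "ye", "woo", "ma"].foldl
        (fun s y => PySem.Str.replace s y " ") x) " " "") == "") = tilesB x.toList := by
  have hlist : (PySem.Str.replace (["aya", "ye", "woo", "ma"].foldl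
      (fun s y => PySem.Str.replace s y " ") x) " " "").toList = chainC x.toList := by
    simp only [List.foldl, PySem.Str.toList_replace,
      show ("aya".toList) = ['a','y','a'] from rfl,
      show ("ye".toList) = ['y','e'] from rfl,
      show ("woo".toList) = ['w','o','o'] from rfl,
      show ("ma".toList) = ['m','a'] from rfl,
      show (" ".toList) = [' '] from rfl,
      show ("".toList) = ([] : List Char) from rfl]
    rw [replace_eq ' ' [] [], replace_eq 'm' ['a'] [' '], replace_eq 'w' ['o','o'] [' '],
        replace_eq 'y' ['e'] [' '], replace_eq 'a' ['y','a'] [' ']]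
    rfl
  rw [beq_empty_eq, hlist]
  by_cases hsp : ' ' ∈ x.toList
  · rw [tiles_space x.toList hsp, beq_eq_false_iff_ne]
    by_cases halpha : ∀ c ∈ x.toList, c ∈ [' ','a','y','e','w','o','m']
    · -- some chunk has a bad shape: A's chain leaves residue in it
      have hbad : ¬ ∀ ch ∈ chunksSp x.toList, goodChunk ch := fun hg => h ⟨hsp, halpha, hg⟩
      push_neg at hbad
      obtain ⟨ch, hch, hng⟩ := hbad
      intro hnil
      have hchnil : chainC ch = [] :=
        (chain_chunks x.toList.length x.toList (Nat.le_refl _)).mp hnil ch hch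
      have htile : tilesB ch = true :=
        (chain_tiles ch (chunksSp_no_space x.toList ch hch)).mp hchnil
      exact hng (tiles_good ch htile)
    · -- some character is foreign: it survives A's whole chain
      push_neg at halpha
      obtain ⟨c, hcm, hcf⟩ := halpha
      exact chain_foreign x.toList c hcm hcf
  · have key := chain_tiles x.toList hsp
    rcases Bool.eq_false_or_eq_true (tilesB x.toList) with hb | hb
    · rw [hb, beq_iff_eq]
      exact key.mpr hb
    · rw [hb, beq_eq_false_iff_ne]
      intro hc
      exact absurd (key.mp hc) (by simp [hb])

lemma fold_eq (l : List String)
    (h : ∀ x ∈ l, ¬ (' ' ∈ x.toList ∧ (∀ c ∈ x.toList, c ∈ [' ','a','y','e','w','o','m']) ∧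
      (∀ ch ∈ chunksSp x.toList, goodChunk ch = true))) (acc : Int) :
      l.foldl (fun answer x0 =>
        let x := ["aya", "ye", "woo", "ma"].foldl (fun s y => PySem.Str.replace s y " ") x0
        let x := PySem.Str.replace x " " ""
        if x == "" then answer + 1 else answer) acc
      = l.foldl (fun answer x => if tilesB x.toList then answer + 1 else answer) acc := by
  apply PySem.List.foldl_congr_mem
  intro a x hx
  show (if ((PySem.Str.replace (["aya", "ye", "woo", "ma"].foldl
        (fun s y => PySem.Str.replace s y " ") x) " " "") == "") then a + 1 else a)
      = if tilesB x.toList then a + 1 else a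
  rw [word_eq x (h x hx)]

-- ===== VERDICT (by name: the statement is the Claim_ definition above) =====
theorem solution_spec : Claim_equal_solution := by
  intro babbling _ hpre
  unfold Spec_solution solution solution_alt
  exact fold_eq babbling hpre 0
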